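-- pv_equiv track=rewrite | github.com/speed785/synapse-orchestrator | python/synapse/executor.py | _split_ref
-- ===== SOURCE A (Python) =====
-- from typing import Any, Callable, Coroutine
--
-- def _split_ref(raw_ref: str, results: dict[str, Any]) -> tuple[str, str | None]:
--     parts = raw_ref.split(".")
--     for i in range(len(parts), 0, -1):
--         candidate = ".".join(parts[:i])
--         if candidate in results:
--             suffix = ".".join(parts[i:])
--             return candidate, (suffix or None)
--
--     return raw_ref, None
-- ===== SOURCE B (Python) =====
-- def _split_ref(raw_ref: str, results: dict) -> tuple:
--     # Scan the dict's keys once: a key is usable iff it is raw_ref itself or a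
--     # dotted prefix of it; keep the longest such key (dotted prefixes of the
--     # same string of equal length are equal, so "longest" is unambiguous).
--     best = None
--     for key in results:
--         if (key == raw_ref or raw_ref.startswith(key + ".")) and (
--             best is None or len(key) > len(best)
--         ):
--             best = key
--     if best is None:
--         return raw_ref, None
--     return best, (raw_ref[len(best) + 1 :] or None)
-- ===== Notes on version B (the rewrite author's own statement) =====
-- stated objective: alternative
-- what changed: Instead of generating the dotted prefixes of raw_ref longest-first and testing each for dict membership, B makes a single pass over the dict's keys, keeping the longest key that equals raw_ref or is a dotted prefix of it (such keys of equal length coincide, so the maximum is unambiguous), then slices the suffix off once at the end.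
import Mathlib
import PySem

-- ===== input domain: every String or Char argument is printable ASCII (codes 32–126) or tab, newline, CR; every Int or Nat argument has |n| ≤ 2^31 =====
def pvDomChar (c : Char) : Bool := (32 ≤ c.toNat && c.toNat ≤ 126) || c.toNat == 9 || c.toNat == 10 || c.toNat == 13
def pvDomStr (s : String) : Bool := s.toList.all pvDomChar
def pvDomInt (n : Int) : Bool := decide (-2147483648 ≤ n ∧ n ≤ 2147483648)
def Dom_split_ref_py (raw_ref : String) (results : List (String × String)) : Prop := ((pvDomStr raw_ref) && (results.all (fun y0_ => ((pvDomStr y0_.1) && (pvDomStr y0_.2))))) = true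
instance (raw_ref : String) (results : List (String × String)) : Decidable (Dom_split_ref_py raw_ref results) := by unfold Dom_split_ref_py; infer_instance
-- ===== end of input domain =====

-- B replaces A's longest-first generate-prefixes-and-test-membership loop by a single
-- pass over the dict's keys keeping the longest key that is raw_ref or a dotted prefix of it.

-- ===== PORT A =====
-- the 'for i in range(len(parts), 0, -1)' loop with early return, over the pyRange list
def splitRefLoopA (parts : List String) (results : List (String × String)) :
    List Int → Option (String × Option String)
  | [] => none
  | i :: rest =>
    let candidate := PySem.Str.join "." (PySem.List.slice parts none (some i))
    if results.any (fun kv => kv.1 == candidate) then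
      let suffix := PySem.Str.join "." (PySem.List.slice parts (some i) none)
      some (candidate, if suffix == "" then none else some suffix)
    else splitRefLoopA parts results rest

def split_ref_py (raw_ref : String) (results : List (String × String)) : String × Option String :=
  let parts := (PySem.Str.split? raw_ref ".").getD []
  match splitRefLoopA parts results (PySem.List.pyRange (parts.length : Int) 0 (-1)) with
  | some r => r
  | none => (raw_ref, none)

-- ===== PORT B =====
-- B's 'for key in results' loop carrying best (the char-list of the best key so far);
-- 'key == raw_ref or raw_ref.startswith(key + ".")' and 'len(key) > len(best)' are
-- exact on char lists (PySem.Chars.startswith; String equality = char-list equality)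
def bScan (raw : List Char) : List (String × String) → Option (List Char) → Option (List Char)
  | [], best => best
  | kv :: rs, best =>
    if ((kv.1.toList == raw) || PySem.Chars.startswith raw (kv.1.toList ++ ['.'])) &&
       (match best with
        | none => true
        | some b => decide (b.length < kv.1.toList.length)) then
      bScan raw rs (some kv.1.toList)
    else bScan raw rs best

def split_ref_py_alt (raw_ref : String) (results : List (String × String)) : String × Option String :=
  match bScan raw_ref.toList results none with
  | none => (raw_ref, none)
  | some b =>
    -- raw_ref[len(b)+1:] with a nonnegative index is exactly List.drop (len b + 1)
    let s := raw_ref.toList.drop (b.length + 1)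
    (String.ofList b, if s = [] then none else some (String.ofList s))

-- ===== PRECONDITION & SPEC =====
def Spec_split_ref_py (raw_ref : String) (results : List (String × String)) (out : String × Option String) : Prop := out = split_ref_py_alt raw_ref results
instance (raw_ref : String) (results : List (String × String)) (out : String × Option String) : Decidable (Spec_split_ref_py raw_ref results out) := by unfold Spec_split_ref_py; infer_instance

-- ===== CLAIM (what is proved, stated in full; the proofs are below) =====
def Claim_equal_split_ref_py : Prop := ∀ (raw_ref : String) (results : List (String × String)), Dom_split_ref_py raw_ref results → Spec_split_ref_py raw_ref results (split_ref_py raw_ref results)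

-- ===== LEMMAS AND PROOFS =====

-- reference presentation of Python's str.split(".")
def dsplit : List Char → List (List Char)
  | [] => [[]]
  | c :: rest =>
    if c = '.' then [] :: dsplit rest
    else
      match dsplit rest with
      | p :: ps => (c :: p) :: ps
      | [] => [[c]]

theorem dsplit_ne_nil (cs : List Char) : dsplit cs ≠ [] := by
  cases cs with
  | nil => simp [dsplit]
  | cons c rest =>
    simp only [dsplit]
    split
    · simp
    · split <;> simp

theorem ic_cons (p : List Char) (ps : List (List Char)) (h : ps ≠ []) :
    List.intercalate ['.'] (p :: ps) = p ++ '.' :: List.intercalate ['.'] ps := by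
  cases ps with
  | nil => simp at h
  | cons q qs => simp [List.intercalate, List.intersperse]

theorem ic_singleton (p : List Char) : List.intercalate ['.'] [p] = p := by
  simp [List.intercalate]

theorem ic_append (l1 l2 : List (List Char)) (h1 : l1 ≠ []) (h2 : l2 ≠ []) :
    List.intercalate ['.'] (l1 ++ l2) = List.intercalate ['.'] l1 ++ '.' :: List.intercalate ['.'] l2 := by
  induction l1 with
  | nil => simp at h1
  | cons p ps ih =>
    cases hps : ps with
    | nil => subst hps; simp [ic_singleton, ic_cons p l2 h2]
    | cons q qs =>
      subst hps
      rw [List.cons_append, ic_cons p ((q :: qs) ++ l2) (by simp),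
        ic_cons p (q :: qs) (by simp), ih (by simp)]
      simp

theorem join_dsplit (cs : List Char) : List.intercalate ['.'] (dsplit cs) = cs := by
  induction cs with
  | nil => simp [dsplit, ic_singleton]
  | cons c rest ih =>
    simp only [dsplit]
    split
    · rename_i hc
      subst hc
      rw [ic_cons [] (dsplit rest) (dsplit_ne_nil rest)]
      simp [ih]
    · cases hd : dsplit rest with
      | nil => exact absurd hd (dsplit_ne_nil rest)
      | cons p ps =>
        rw [hd] at ih
        cases ps with
        | nil => rw [ic_singleton] at ih; simp [ic_singleton, ih]
        | cons q qs =>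
          rw [ic_cons p (q :: qs) (by simp)] at ih
          rw [ic_cons (c :: p) (q :: qs) (by simp)]
          simp [← ih]

theorem no_dot_dsplit (cs : List Char) : ∀ p ∈ dsplit cs, '.' ∉ p := by
  induction cs with
  | nil => simp [dsplit]
  | cons c rest ih =>
    simp only [dsplit]
    split
    · intro p hp
      simp at hp
      rcases hp with h | h
      · simp [h]
      · exact ih p h
    · rename_i hc
      cases hd : dsplit rest with
      | nil => exact absurd hd (dsplit_ne_nil rest)
      | cons q qs =>
        rw [hd] at ih
        intro p hp
        simp at hp
        rcases hp with h | h
        · subst h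
          intro hmem
          simp at hmem
          rcases hmem with h | h
          · exact hc h.symm
          · exact ih q (by simp) h
        · exact ih p (by simp [h])

theorem dsplit_append (a b : List Char) : dsplit (a ++ '.' :: b) = dsplit a ++ dsplit b := by
  induction a with
  | nil => simp [dsplit]
  | cons c a ih =>
    by_cases hc : c = '.'
    · simp [dsplit, hc, ih]
    · simp only [List.cons_append, dsplit, if_neg hc, ih]
      cases hd : dsplit a with
      | nil => exact absurd hd (dsplit_ne_nil a)
      | cons p ps => simp

theorem dsplit_no_dot (p : List Char) (h : '.' ∉ p) : dsplit p = [p] := by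
  induction p with
  | nil => simp [dsplit]
  | cons c q ih =>
    have hc : c ≠ '.' := by intro hx; exact h (by simp [hx])
    have hq : '.' ∉ q := by intro hx; exact h (by simp [hx])
    simp [dsplit, hc, ih hq]

theorem dsplit_ic (l : List (List Char)) (hne : l ≠ []) (hdot : ∀ p ∈ l, '.' ∉ p) :
    dsplit (List.intercalate ['.'] l) = l := by
  induction l with
  | nil => simp at hne
  | cons p ps ih =>
    cases hps : ps with
    | nil =>
      subst hps
      rw [ic_singleton]
      exact dsplit_no_dot p (hdot p (by simp))
    | cons q qs =>
      subst hps
      rw [ic_cons p (q :: qs) (by simp), dsplit_append,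
        dsplit_no_dot p (hdot p (by simp)), ih (by simp) (fun r hr => hdot r (by simp [hr]))]
      simp

-- dot-joined prefixes of cs
def candAt (cs : List Char) (i : Nat) : List Char :=
  List.intercalate ['.'] ((dsplit cs).take i)

theorem candAt_length_eq (cs : List Char) : candAt cs (dsplit cs).length = cs := by
  rw [candAt, List.take_length, join_dsplit]

theorem candAt_decomp (cs : List Char) (i : Nat) (h1 : 1 ≤ i) (h2 : i < (dsplit cs).length) :
    cs = candAt cs i ++ '.' :: List.intercalate ['.'] ((dsplit cs).drop i) := by
  conv_lhs => rw [← join_dsplit cs]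
  rw [← List.take_append_drop i (dsplit cs)]
  rw [ic_append _ _ (by
      intro h
      have := congrArg List.length h
      rw [List.length_take, List.length_nil] at this
      omega)
    (by
      intro h
      have := congrArg List.length h
      rw [List.length_drop, List.length_nil] at this
      omega)]
  rw [candAt]
  congr 1 <;> try rw [List.take_append_drop]

theorem candAt_lt_length (cs : List Char) (i j : Nat) (h1 : 1 ≤ i) (hij : i < j)
    (hj : j ≤ (dsplit cs).length) : (candAt cs i).length < (candAt cs j).length := by
  have hdecomp : candAt cs j = candAt cs i ++ '.' ::
      List.intercalate ['.'] (((dsplit cs).take j).drop i) := by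
    have hsub : dsplit ((candAt cs j)) = (dsplit cs).take j := by
      apply dsplit_ic
      · intro h
        have := congrArg List.length h
        rw [List.length_take, List.length_nil] at this
        omega
      · intro p hp
        exact no_dot_dsplit cs p (List.mem_of_mem_take hp)
    have := candAt_decomp (candAt cs j) i h1 (by
      rw [hsub, List.length_take]; omega)
    have hcc : candAt (candAt cs j) i = candAt cs i := by
      unfold candAt
      rw [show dsplit (List.intercalate ['.'] (List.take j (dsplit cs))) = List.take j (dsplit cs) from hsub,
        List.take_take, min_eq_left (le_of_lt hij)]
    rw [hcc, hsub] at this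
    exact this
  rw [hdecomp]
  simp

theorem candAt_le_length (cs : List Char) (i j : Nat) (h1 : 1 ≤ i) (hij : i ≤ j)
    (hj : j ≤ (dsplit cs).length) : (candAt cs i).length ≤ (candAt cs j).length := by
  rcases Nat.lt_or_ge i j with h | h
  · exact le_of_lt (candAt_lt_length cs i j h1 h hj)
  · have : i = j := by omega
    subst this; rfl

theorem candAt_inj (cs : List Char) (i j : Nat) (hi1 : 1 ≤ i) (hiL : i ≤ (dsplit cs).length)
    (hj1 : 1 ≤ j) (hjL : j ≤ (dsplit cs).length) (h : candAt cs i = candAt cs j) : i = j := by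
  rcases Nat.lt_trichotomy i j with hlt | heq | hgt
  · have := candAt_lt_length cs i j hi1 hlt hjL
    rw [h] at this; omega
  · exact heq
  · have := candAt_lt_length cs j i hj1 hgt hiL
    rw [h] at this; omega

-- index of a key among the candidates, or none if the key matches no candidate
def idxOf (cs k : List Char) : Option Nat :=
  if k = cs then some (dsplit cs).length
  else if (k ++ ['.']).isPrefixOf cs then some (dsplit k).length
  else none

theorem idxOf_sound (cs k : List Char) (i : Nat) (h : idxOf cs k = some i) :
    1 ≤ i ∧ i ≤ (dsplit cs).length ∧ candAt cs i = k := by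
  unfold idxOf at h
  split at h
  · rename_i hk
    cases h
    subst hk
    refine ⟨?_, le_refl _, candAt_length_eq k⟩
    have := dsplit_ne_nil k
    cases hd : dsplit k with
    | nil => exact absurd hd this
    | cons p ps => simp [hd]
  · split at h
    · rename_i hk hp
      cases h
      obtain ⟨t, ht⟩ := List.isPrefixOf_iff_prefix.mp hp
      have hcs : cs = k ++ '.' :: t := by rw [← ht]; simp
      have hds : dsplit cs = dsplit k ++ dsplit t := by rw [hcs, dsplit_append]
      have hk1 : 1 ≤ (dsplit k).length := by
        cases hd : dsplit k with
        | nil => exact absurd hd (dsplit_ne_nil k)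
        | cons p ps => simp
      refine ⟨hk1, by rw [hds]; simp, ?_⟩
      rw [candAt, hds, List.take_left, join_dsplit]
    · cases h

theorem idxOf_cand (cs : List Char) (i : Nat) (h1 : 1 ≤ i) (h2 : i ≤ (dsplit cs).length) :
    idxOf cs (candAt cs i) = some i := by
  rcases Nat.lt_or_ge i (dsplit cs).length with hlt | hge
  · have hne : candAt cs i ≠ cs := by
      intro h
      have := candAt_inj cs i (dsplit cs).length h1 h2 (by
        cases hd : dsplit cs with
        | nil => exact absurd hd (dsplit_ne_nil cs)
        | cons p ps => simp [hd]) (le_refl _) (by rw [h, candAt_length_eq])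
      omega
    have hpre : ((candAt cs i) ++ ['.']).isPrefixOf cs = true := by
      rw [List.isPrefixOf_iff_prefix]
      refine ⟨List.intercalate ['.'] ((dsplit cs).drop i), ?_⟩
      rw [List.append_assoc]
      exact (candAt_decomp cs i h1 hlt).symm
    have hds : dsplit (candAt cs i) = (dsplit cs).take i := by
      apply dsplit_ic
      · intro h
        have := congrArg List.length h
        rw [List.length_take, List.length_nil] at this
        omega
      · intro p hp
        exact no_dot_dsplit cs p (List.mem_of_mem_take hp)
    rw [idxOf, if_neg hne, if_pos hpre, hds, List.length_take]
    congr 1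
    omega
  · have hiL : i = (dsplit cs).length := by omega
    subst hiL
    rw [idxOf, if_pos (candAt_length_eq cs)]

theorem matches_iff_idx (cs k : List Char) :
    ((k == cs) || PySem.Chars.startswith cs (k ++ ['.'])) = true ↔ idxOf cs k ≠ none := by
  unfold idxOf
  rw [Bool.or_eq_true, beq_iff_eq, PySem.Chars.startswith_iff]
  constructor
  · rintro (h | h)
    · simp [h]
    · split
      · simp
      · rw [if_pos (List.isPrefixOf_iff_prefix.mpr h)]; simp
  · intro h
    split at h
    · left; assumption
    · split at h
      · right
        rename_i hp
        exact List.isPrefixOf_iff_prefix.mp hp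
      · simp at h

-- greatest i ∈ [1, j] with f i, searched downward (abstract shape of A's loop)
def gsearch (f : Nat → Bool) : Nat → Option Nat
  | 0 => none
  | j + 1 => if f (j + 1) then some (j + 1) else gsearch f j

theorem gsearch_none_iff (f : Nat → Bool) (j : Nat) :
    gsearch f j = none ↔ ∀ i, 1 ≤ i → i ≤ j → f i = false := by
  induction j with
  | zero => simp [gsearch]; omega
  | succ j ih =>
    rw [gsearch]
    by_cases h : f (j + 1) = true
    · simp [h]
      exact ⟨j + 1, by omega, by omega, h⟩
    · rw [if_neg h, ih]
      constructor
      · intro hall i h1 h2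
        rcases Nat.lt_or_ge i (j + 1) with hl | hg
        · exact hall i h1 (by omega)
        · have : i = j + 1 := by omega
          subst this
          simpa using h
      · intro hall i h1 h2
        exact hall i h1 (by omega)

theorem gsearch_some_iff (f : Nat → Bool) (j i : Nat) :
    gsearch f j = some i ↔
      1 ≤ i ∧ i ≤ j ∧ f i = true ∧ ∀ i', i < i' → i' ≤ j → f i' = false := by
  induction j with
  | zero => simp [gsearch]; omega
  | succ j ih =>
    rw [gsearch]
    by_cases h : f (j + 1) = true
    · rw [if_pos h]
      constructor
      · intro hx
        cases hx
        exact ⟨by omega, le_refl _, h, fun i' h1 h2 => by omega⟩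
      · rintro ⟨h1, h2, h3, h4⟩
        rcases Nat.lt_or_ge i (j + 1) with hl | hg
        · have := h4 (j + 1) (by omega) (le_refl _)
          rw [h] at this; cases this
        · congr 1; omega
    · rw [if_neg h, ih]
      constructor
      · rintro ⟨h1, h2, h3, h4⟩
        refine ⟨h1, by omega, h3, fun i' hi1 hi2 => ?_⟩
        rcases Nat.lt_or_ge i' (j + 1) with hl | hg
        · exact h4 i' hi1 (by omega)
        · have : i' = j + 1 := by omega
          subst this
          simpa using h
      · rintro ⟨h1, h2, h3, h4⟩
        have hne : i ≠ j + 1 := by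
          intro hx; subst hx; exact h h3
        exact ⟨h1, by omega, h3, fun i' hi1 hi2 => h4 i' hi1 (by omega)⟩

-- proof-side mirror of B's scan, on indices (max of the matching indices seen)
def stepIdx (cs : List Char) (kv : String × String) (o : Option Nat) : Option Nat :=
  match idxOf cs kv.1.toList with
  | none => o
  | some i => some (max i (o.getD 0))

def runIdx (cs : List Char) : List (String × String) → Option Nat → Option Nat
  | [], o => o
  | kv :: rs, o => runIdx cs rs (stepIdx cs kv o)

theorem stepIdx_none (cs : List Char) (kv : String × String) (o : Option Nat)
    (h : idxOf cs kv.1.toList = none) : stepIdx cs kv o = o := by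
  unfold stepIdx; rw [h]

theorem stepIdx_some (cs : List Char) (kv : String × String) (o : Option Nat) (i : Nat)
    (h : idxOf cs kv.1.toList = some i) : stepIdx cs kv o = some (max i (o.getD 0)) := by
  unfold stepIdx; rw [h]

theorem beq_toList (s t : String) : (s == t) = (s.toList == t.toList) := by
  by_cases h : s = t
  · simp [h]
  · have : s.toList ≠ t.toList := fun hc => h (String.toList_inj.mp hc)
    simp [h, this]

theorem bScan_nil (raw : List Char) (best : Option (List Char)) : bScan raw [] best = best := by
  cases best <;> rfl

theorem bScan_cons (raw : List Char) (kv : String × String) (rs : List (String × String))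
    (best : Option (List Char)) :
    bScan raw (kv :: rs) best =
      if ((kv.1.toList == raw) || PySem.Chars.startswith raw (kv.1.toList ++ ['.'])) &&
         (match best with
          | none => true
          | some b => decide (b.length < kv.1.toList.length)) then
        bScan raw rs (some kv.1.toList)
      else bScan raw rs best := by
  cases best <;> rfl

-- validity of the accumulator
def validO (cs : List Char) (o : Option Nat) : Prop :=
  ∀ i, o = some i → 1 ≤ i ∧ i ≤ (dsplit cs).length

theorem bScan_eq_runIdx (cs : List Char) :
    ∀ (rs : List (String × String)) (o : Option Nat), validO cs o →
      bScan cs rs (o.map (candAt cs)) = (runIdx cs rs o).map (candAt cs) := by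
  intro rs
  induction rs with
  | nil => intro o _; simp [bScan_nil, runIdx]
  | cons kv rs ih =>
    intro o hv
    rw [runIdx]
    cases hidx : idxOf cs kv.1.toList with
    | none =>
      have hm : ((kv.1.toList == cs) || PySem.Chars.startswith cs (kv.1.toList ++ ['.'])) = false := by
        by_contra h
        have := (matches_iff_idx cs kv.1.toList).mp (by
          cases hx : ((kv.1.toList == cs) || PySem.Chars.startswith cs (kv.1.toList ++ ['.'])) with
          | true => rfl
          | false => exact absurd hx h)
        exact this hidx
      rw [bScan_cons, if_neg (by simp [hm]), stepIdx_none cs kv o hidx]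
      exact ih o hv
    | some i =>
      obtain ⟨hi1, hiL, hcand⟩ := idxOf_sound cs kv.1.toList i hidx
      have hm : ((kv.1.toList == cs) || PySem.Chars.startswith cs (kv.1.toList ++ ['.'])) = true :=
        (matches_iff_idx cs kv.1.toList).mpr (by rw [hidx]; simp)
      rw [stepIdx_some cs kv o i hidx]
      cases o with
      | none =>
        rw [bScan_cons]
        simp only [Option.map_none]
        rw [if_pos (by rw [hm, Bool.true_and])]
        have hmax : max i (Option.getD (none : Option Nat) 0) = i := by simp
        rw [hmax]
        have := ih (some i) (by intro i' hi'; cases hi'; exact ⟨hi1, hiL⟩)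
        simpa [← hcand] using this
      | some i0 =>
        obtain ⟨hi01, hi0L⟩ := hv i0 rfl
        rw [bScan_cons]
        simp only [Option.map_some, Option.getD_some]
        by_cases hlt : i0 < i
        · have hlen : (candAt cs i0).length < kv.1.toList.length := by
            rw [← hcand]
            exact candAt_lt_length cs i0 i hi01 hlt hiL
          rw [if_pos (by rw [hm, Bool.true_and]; exact decide_eq_true hlen),
            Nat.max_eq_left (le_of_lt hlt)]
          have := ih (some i) (by intro i' hi'; cases hi'; exact ⟨hi1, hiL⟩)
          simpa [← hcand] using this
        · have hlen : ¬ (candAt cs i0).length < kv.1.toList.length := by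
            rw [← hcand]
            have := candAt_le_length cs i i0 hi1 (by omega) hi0L
            omega
          rw [if_neg (by rw [hm, Bool.true_and]; exact fun hx => hlen (of_decide_eq_true hx)),
            Nat.max_eq_right (by omega)]
          have := ih (some i0) (by intro i' hi'; cases hi'; exact ⟨hi01, hi0L⟩)
          simpa using this

theorem runIdx_valid (cs : List Char) :
    ∀ (rs : List (String × String)) (o : Option Nat), validO cs o → validO cs (runIdx cs rs o) := by
  intro rs
  induction rs with
  | nil => intro o hv; simpa [runIdx] using hv
  | cons kv rs ih =>
    intro o hv
    rw [runIdx]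
    apply ih
    cases hidx : idxOf cs kv.1.toList with
    | none => rw [stepIdx_none cs kv o hidx]; exact hv
    | some i =>
      obtain ⟨hi1, hiL, _⟩ := idxOf_sound cs kv.1.toList i hidx
      rw [stepIdx_some cs kv o i hidx]
      intro i' hi'
      cases hi'
      refine ⟨le_trans hi1 (Nat.le_max_left _ _), Nat.max_le.mpr ⟨hiL, ?_⟩⟩
      cases o with
      | none => simp
      | some i0 => simpa using (hv i0 rfl).2

theorem runIdx_none_iff (cs : List Char) :
    ∀ (rs : List (String × String)) (o : Option Nat),
      runIdx cs rs o = none ↔ o = none ∧ ∀ kv ∈ rs, idxOf cs kv.1.toList = none := by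
  intro rs
  induction rs with
  | nil => intro o; simp [runIdx]
  | cons kv rs ih =>
    intro o
    rw [runIdx, ih]
    constructor
    · rintro ⟨h1, h2⟩
      cases hidx : idxOf cs kv.1.toList with
      | none =>
        rw [stepIdx_none cs kv o hidx] at h1
        refine ⟨h1, fun kv' hkv' => ?_⟩
        rcases List.mem_cons.mp hkv' with h | h
        · subst h; exact hidx
        · exact h2 kv' h
      | some i =>
        rw [stepIdx_some cs kv o i hidx] at h1
        cases h1
    · rintro ⟨h1, h2⟩
      subst h1
      exact ⟨by rw [stepIdx_none cs kv none (h2 kv (by simp))],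
        fun kv' hkv' => h2 kv' (List.mem_cons_of_mem _ hkv')⟩

theorem runIdx_attained (cs : List Char) :
    ∀ (rs : List (String × String)) (o : Option Nat) (m : Nat),
      runIdx cs rs o = some m →
      o = some m ∨ ∃ kv ∈ rs, idxOf cs kv.1.toList = some m := by
  intro rs
  induction rs with
  | nil => intro o m h; left; simpa [runIdx] using h
  | cons kv rs ih =>
    intro o m h
    rw [runIdx] at h
    rcases ih _ m h with h1 | ⟨kv', hkv', hidx'⟩
    · cases hidx : idxOf cs kv.1.toList with
      | none =>
        rw [stepIdx_none cs kv o hidx] at h1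
        left; exact h1
      | some i =>
        rw [stepIdx_some cs kv o i hidx] at h1
        cases h1
        cases o with
        | none =>
          right
          refine ⟨kv, by simp, ?_⟩
          rw [hidx]
          simp
        | some i0 =>
          rcases Nat.le_total i i0 with hle | hle
          · left
            simp only [Option.getD_some]
            rw [Nat.max_eq_right hle]
          · right
            refine ⟨kv, by simp, ?_⟩
            rw [hidx]
            simp only [Option.getD_some]
            rw [Nat.max_eq_left hle]
    · right; exact ⟨kv', List.mem_cons_of_mem _ hkv', hidx'⟩

theorem runIdx_ub (cs : List Char) :
    ∀ (rs : List (String × String)) (o : Option Nat) (m : Nat),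
      runIdx cs rs o = some m →
      (∀ i, o = some i → i ≤ m) ∧
      (∀ kv ∈ rs, ∀ i, idxOf cs kv.1.toList = some i → i ≤ m) := by
  intro rs
  induction rs with
  | nil =>
    intro o m h
    simp [runIdx] at h
    subst h
    exact ⟨by intro i hi; cases hi; rfl, by simp⟩
  | cons kv rs ih =>
    intro o m h
    rw [runIdx] at h
    obtain ⟨hub, hrest⟩ := ih _ m h
    cases hidx : idxOf cs kv.1.toList with
    | none =>
      refine ⟨?_, ?_⟩
      · intro i hi
        exact hub i (by rw [stepIdx_none cs kv o hidx]; exact hi)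
      · intro kv' hkv' i hi
        rcases List.mem_cons.mp hkv' with h' | h'
        · subst h'; rw [hidx] at hi; cases hi
        · exact hrest kv' h' i hi
    | some j =>
      have hmax : max j (o.getD 0) ≤ m :=
        hub _ (by rw [stepIdx_some cs kv o j hidx])
      refine ⟨?_, ?_⟩
      · intro i hi
        rw [hi] at hmax
        simp only [Option.getD_some] at hmax
        have := Nat.le_max_right j i
        omega
      · intro kv' hkv' i hi
        rcases List.mem_cons.mp hkv' with h' | h'
        · subst h'
          rw [hidx] at hi
          cases hi
          have := Nat.le_max_left j (o.getD 0)
          omega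
        · exact hrest kv' h' i hi

-- found-predicate used by A's abstract loop
def foundAt (results : List (String × String)) (cs : List Char) (i : Nat) : Bool :=
  results.any (fun kv => kv.1.toList == candAt cs i)

theorem foundAt_iff (results : List (String × String)) (cs : List Char) (i : Nat)
    (h1 : 1 ≤ i) (h2 : i ≤ (dsplit cs).length) :
    foundAt results cs i = true ↔ ∃ kv ∈ results, idxOf cs kv.1.toList = some i := by
  unfold foundAt
  rw [List.any_eq_true]
  constructor
  · rintro ⟨kv, hkv, hb⟩
    refine ⟨kv, hkv, ?_⟩
    rw [beq_iff_eq] at hb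
    rw [hb]
    exact idxOf_cand cs i h1 h2
  · rintro ⟨kv, hkv, hidx⟩
    obtain ⟨_, _, hcand⟩ := idxOf_sound cs kv.1.toList i hidx
    exact ⟨kv, hkv, by rw [beq_iff_eq, hcand]⟩

-- the central bridge: A's downward search over indices = B's scan over the keys
theorem gsearch_eq_runIdx (cs : List Char) (results : List (String × String)) :
    gsearch (foundAt results cs) (dsplit cs).length = runIdx cs results none := by
  cases hM : runIdx cs results none with
  | none =>
    rw [gsearch_none_iff]
    intro i h1 h2
    obtain ⟨_, hall⟩ := (runIdx_none_iff cs results none).mp hM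
    by_contra h
    have hft : foundAt results cs i = true := by
      cases hx : foundAt results cs i with
      | true => rfl
      | false => exact absurd hx h
    obtain ⟨kv, hkv, hidx⟩ := (foundAt_iff results cs i h1 h2).mp hft
    rw [hall kv hkv] at hidx; cases hidx
  | some m =>
    rcases runIdx_attained cs results none m hM with h | ⟨kv, hkv, hidx⟩
    · cases h
    obtain ⟨hm1, hmL, _⟩ := idxOf_sound cs kv.1.toList m hidx
    rw [gsearch_some_iff]
    refine ⟨hm1, hmL, (foundAt_iff results cs m hm1 hmL).mpr ⟨kv, hkv, hidx⟩, ?_⟩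
    intro i' hi1 hi2
    by_contra h
    have hft : foundAt results cs i' = true := by
      cases hx : foundAt results cs i' with
      | true => rfl
      | false => exact absurd hx h
    obtain ⟨kv', hkv', hidx'⟩ := (foundAt_iff results cs i' (by omega) hi2).mp hft
    have := (runIdx_ub cs results none m hM).2 kv' hkv' i' hidx'
    omega


def consHead (pre : List Char) : List (List Char) → List (List Char)
  | [] => [pre]
  | p :: ps => (pre ++ p) :: ps

theorem splitOn_go_spec (fuel : Nat) : ∀ (l : List Char) (cur : List Char) (acc : List (List Char)),
    l.length ≤ fuel →
    PySem.Chars.splitOn.go ['.'] fuel l cur acc = acc.reverse ++ consHead cur.reverse (dsplit l) := by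
  induction fuel with
  | zero =>
    intro l cur acc hl
    have : l = [] := by cases l <;> simp_all
    subst this
    simp [PySem.Chars.splitOn.go, dsplit, consHead]
  | succ fuel ih =>
    intro l cur acc hl
    cases l with
    | nil => simp [PySem.Chars.splitOn.go, dsplit, consHead]
    | cons c rest =>
      rw [PySem.Chars.splitOn.go]
      by_cases hc : c = '.'
      · subst hc
        have hp : ['.'].isPrefixOf ('.' :: rest) = true := by simp [List.isPrefixOf]
        rw [if_pos hp]
        simp only [List.length_cons] at hl
        rw [ih _ _ _ (by simpa using Nat.le_of_succ_le_succ hl)]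
        simp only [dsplit]
        cases hd : dsplit rest with
        | nil => exact absurd hd (dsplit_ne_nil rest)
        | cons p ps => simp [consHead, hd]
      · have hp : ['.'].isPrefixOf (c :: rest) = false := by simp [List.isPrefixOf]; exact fun h => hc h.symm
        rw [if_neg (by simp [hp])]
        simp only [List.length_cons] at hl
        rw [ih _ _ _ (Nat.le_of_succ_le_succ hl)]
        simp only [dsplit, if_neg hc]
        cases hd : dsplit rest with
        | nil => exact absurd hd (dsplit_ne_nil rest)
        | cons p ps => simp [consHead]

theorem splitOn_eq_dsplit (cs : List Char) : PySem.Chars.splitOn cs ['.'] = dsplit cs := by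
  rw [PySem.Chars.splitOn, splitOn_go_spec (cs.length + 1) cs [] [] (by omega)]
  cases hd : dsplit cs with
  | nil => exact absurd hd (dsplit_ne_nil cs)
  | cons p ps => simp [consHead]

-- A's parts list equals dsplit of the raw string
theorem partsA_eq (raw : String) :
    (PySem.Str.split? raw ".").getD [] = (dsplit raw.toList).map String.ofList := by
  have h : ("." : String).toList = ['.'] := by decide
  rw [PySem.Str.split?, PySem.Chars.split?, h]
  simp [splitOn_eq_dsplit]

-- candidate built by A at index i has toList = intercalate of the first i parts
theorem candA_toList (parts : List (List Char)) (i : Nat) :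
    (PySem.Str.join "." (PySem.List.slice (parts.map String.ofList) none (some (i : Int)))).toList
      = List.intercalate ['.'] (parts.take i) := by
  rw [PySem.Str.toList_join, PySem.List.slice_to _ (by positivity)]
  have h : ("." : String).toList = ['.'] := by decide
  rw [h, PySem.Chars.join]
  simp [← List.map_take, List.map_map, Int.toNat_natCast, Function.comp_def]

theorem suffA_toList (parts : List (List Char)) (i : Nat) :
    (PySem.Str.join "." (PySem.List.slice (parts.map String.ofList) (some (i : Int)) none)).toList
      = List.intercalate ['.'] (parts.drop i) := by
  rw [PySem.Str.toList_join, PySem.List.slice_from _ (by positivity)]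
  have h : ("." : String).toList = ['.'] := by decide
  rw [h, PySem.Chars.join]
  simp [← List.map_drop, List.map_map, Int.toNat_natCast, Function.comp_def]

-- output A produces for the candidate index i
def outA (cs : List Char) (i : Nat) : String × Option String :=
  (String.ofList (candAt cs i),
    if List.intercalate ['.'] ((dsplit cs).drop i) = [] then none
    else some (String.ofList (List.intercalate ['.'] ((dsplit cs).drop i))))

theorem loopA_eq (cs : List Char) (results : List (String × String)) :
    ∀ j : Nat,
      splitRefLoopA ((dsplit cs).map String.ofList) results (PySem.List.pyRange (j : Int) 0 (-1))
        = (gsearch (foundAt results cs) j).map (outA cs) := by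
  intro j
  induction j with
  | zero =>
    rw [show ((0 : Nat) : Int) = (0 : Int) by norm_num,
      PySem.List.pyRange_neg_one_eq_nil (le_refl 0)]
    simp [splitRefLoopA, gsearch]
  | succ j ih =>
    have hcons : PySem.List.pyRange ((j + 1 : Nat) : Int) 0 (-1)
        = ((j + 1 : Nat) : Int) :: PySem.List.pyRange ((j : Nat) : Int) 0 (-1) := by
      rw [PySem.List.pyRange_neg_one_cons (by positivity)]
      norm_num
    rw [hcons]
    simp only [splitRefLoopA]
    have hcl : (PySem.Str.join "." (PySem.List.slice ((dsplit cs).map String.ofList) none (some ((j + 1 : Nat) : Int)))).toList = candAt cs (j + 1) := candA_toList (dsplit cs) (j + 1)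
    have hpred : (fun kv : String × String => kv.1 == PySem.Str.join "." (PySem.List.slice ((dsplit cs).map String.ofList) none (some ((j + 1 : Nat) : Int))))
        = fun kv => kv.1.toList == candAt cs (j + 1) := by
      funext kv; rw [beq_toList, hcl]
    rw [hpred]
    have hcond : (results.any fun kv => kv.1.toList == candAt cs (j + 1)) = foundAt results cs (j + 1) := rfl
    rw [hcond, gsearch]
    by_cases hf : foundAt results cs (j + 1) = true
    · rw [if_pos hf, if_pos hf]
      have hcofl : PySem.Str.join "." (PySem.List.slice ((dsplit cs).map String.ofList) none (some ((j + 1 : Nat) : Int)))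
          = String.ofList (candAt cs (j + 1)) := by
        rw [← hcl, String.ofList_toList]
      have hsl := suffA_toList (dsplit cs) (j + 1)
      have hsofl : PySem.Str.join "." (PySem.List.slice ((dsplit cs).map String.ofList) (some ((j + 1 : Nat) : Int)) none)
          = String.ofList (List.intercalate ['.'] ((dsplit cs).drop (j + 1))) := by
        rw [← hsl, String.ofList_toList]
      simp only [hcofl, hsofl, Option.map_some]
      unfold outA
      have hemp : ("" : String).toList = ([] : List Char) := by decide
      have hcond : (String.ofList (List.intercalate ['.'] ((dsplit cs).drop (j + 1))) == "")
          = (List.intercalate ['.'] ((dsplit cs).drop (j + 1)) == ([] : List Char)) := by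
        rw [beq_toList, String.toList_ofList, hemp]
      rw [hcond]
      by_cases hS : List.intercalate ['.'] ((dsplit cs).drop (j + 1)) = []
      · simp [hS]
      · simp [hS]
    · rw [if_neg hf, if_neg hf]
      exact ih

-- ===== VERDICT (by name: the statement is the Claim_ definition above) =====
theorem split_ref_py_spec : Claim_equal_split_ref_py := by
  intro raw results _
  unfold Spec_split_ref_py split_ref_py split_ref_py_alt
  rw [partsA_eq]
  set cs := raw.toList with hcs
  show (match splitRefLoopA ((dsplit cs).map String.ofList) results
      (PySem.List.pyRange ((((dsplit cs).map String.ofList).length : Nat) : Int) 0 (-1)) with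
    | some r => r
    | none => (raw, none)) =
    (match bScan cs results none with
    | none => (raw, none)
    | some b =>
      (String.ofList b,
        if cs.drop (b.length + 1) = [] then none
        else some (String.ofList (cs.drop (b.length + 1)))))
  rw [List.length_map, loopA_eq cs results (dsplit cs).length, gsearch_eq_runIdx cs results]
  have hB : bScan cs results none = (runIdx cs results none).map (candAt cs) := by
    have := bScan_eq_runIdx cs results none (by intro i h; cases h)
    simpa using this
  rw [hB]
  cases hM : runIdx cs results none with
  | none => simp
  | some i =>
    obtain ⟨hi1, hiL⟩ := runIdx_valid cs results none (by intro i' h; cases h) i hM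
    simp only [Option.map_some]
    unfold outA
    have hsuffix : cs.drop ((candAt cs i).length + 1)
        = List.intercalate ['.'] ((dsplit cs).drop i) := by
      rcases Nat.lt_or_ge i (dsplit cs).length with hlt | hge
      · have hd := candAt_decomp cs i hi1 hlt
        set C := candAt cs i with hC
        conv_lhs => rw [hd]
        rw [show C ++ '.' :: List.intercalate ['.'] ((dsplit cs).drop i)
            = (C ++ ['.']) ++ List.intercalate ['.'] ((dsplit cs).drop i) by simp]
        rw [show C.length + 1 = (C ++ ['.']).length by simp]
        exact List.drop_left
      · have hieq : i = (dsplit cs).length := by omega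
        subst hieq
        rw [candAt_length_eq cs, List.drop_length]
        exact List.drop_eq_nil_of_le (by omega)
    simp only [hsuffix]
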